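-- pv_equiv track=rewrite | github.com/alexeybutyrev/leetcode-solutions | solutions/1798. Maximum Number of Consecutive Values You Can Make/solution.py | getMaximumConsecutive
-- ===== SOURCE A (Python) =====
-- from typing import List
--
-- def getMaximumConsecutive(coins: List[int]) -> int:
--
--     coins.sort()
--     k = 1
--
--
--     for c in coins:
--         if c <= k:
--             k += c
--         else:
--             break
--
--     return k
-- ===== SOURCE B (Python) =====
-- def getMaximumConsecutive(coins):
--     coins.sort()
--     prefix = [0]
--     for c in coins:
--         prefix.append(prefix[-1] + c)
--     for c, p in zip(coins, prefix):
--         if c > p + 1: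
--             return p + 1
--     return prefix[-1] + 1
-- ===== Notes on version B (the rewrite author's own statement) =====
-- stated objective: alternative
-- what changed: A's single fused loop (accumulate k with break) is split into a prefix-sum table built first and a separate zip-based search for the first coin exceeding 1 plus the sum of all earlier coins.
import Mathlib
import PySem

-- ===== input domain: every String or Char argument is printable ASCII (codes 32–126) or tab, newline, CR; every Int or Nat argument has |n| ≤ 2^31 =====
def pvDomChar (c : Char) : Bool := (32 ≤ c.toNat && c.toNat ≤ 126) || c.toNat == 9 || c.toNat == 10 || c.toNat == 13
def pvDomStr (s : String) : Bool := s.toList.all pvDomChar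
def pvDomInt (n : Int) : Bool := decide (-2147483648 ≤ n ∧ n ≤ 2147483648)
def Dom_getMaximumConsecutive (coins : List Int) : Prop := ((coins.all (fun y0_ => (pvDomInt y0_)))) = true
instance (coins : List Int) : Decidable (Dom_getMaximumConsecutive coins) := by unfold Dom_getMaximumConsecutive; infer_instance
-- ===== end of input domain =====

-- B replaces A's fused accumulate-with-break loop by a prefix-sum table plus a separate
-- zip search (alternative decomposition, same cost). Both Pythons sort the argument in
-- place; the equivalence proved here is about the return value.

-- ===== PORT A =====
-- A's for-loop with break: k accumulates while c ≤ k
def pvLoopA : List Int → Int → Int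
  | [], k => k
  | c :: rest, k => if c ≤ k then pvLoopA rest (k + c) else k

def getMaximumConsecutive (coins : List Int) : Int :=
  pvLoopA (PySem.List.sorted coins (fun x => x) false) 1

-- ===== PORT B =====
-- prefix = [0]; for c in coins: prefix.append(prefix[-1] + c)
def pvBuildPrefix (coins : List Int) : List Int :=
  coins.foldl (fun pref c => pref ++ [pref.getLastD 0 + c]) [0]

-- for c, p in zip(coins, prefix): if c > p + 1: return p + 1  /  return prefix[-1] + 1
def pvLoopB : List (Int × Int) → List Int → Int
  | [], pref => pref.getLastD 0 + 1
  | (c, p) :: rest, pref => if c > p + 1 then p + 1 else pvLoopB rest pref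

def getMaximumConsecutive_alt (coins : List Int) : Int :=
  let s := PySem.List.sorted coins (fun x => x) false
  let pref := pvBuildPrefix s
  pvLoopB (s.zip pref) pref

-- ===== PRECONDITION & SPEC =====
def Spec_getMaximumConsecutive (coins : List Int) (out : Int) : Prop := out = getMaximumConsecutive_alt coins
instance (coins : List Int) (out : Int) : Decidable (Spec_getMaximumConsecutive coins out) := by unfold Spec_getMaximumConsecutive; infer_instance

-- ===== CLAIM (what is proved, stated in full; the proofs are below) =====
def Claim_equal_getMaximumConsecutive : Prop := ∀ (coins : List Int), Dom_getMaximumConsecutive coins → Spec_getMaximumConsecutive coins (getMaximumConsecutive coins)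

-- ===== LEMMAS AND PROOFS =====

-- the mathematical prefix-sum scan: pvPsums b xs = [b, b+x0, b+x0+x1, …]
def pvPsums : Int → List Int → List Int
  | b, [] => [b]
  | b, c :: r => b :: pvPsums (b + c) r

theorem pv_dropLast_getLastD (acc : List Int) (h : acc ≠ []) :
    acc.dropLast ++ [acc.getLastD 0] = acc := by
  rw [List.getLastD_eq_getLast?, List.getLast?_eq_some_getLast h]
  exact List.dropLast_append_getLast h

theorem pvBuildPrefix_aux (xs : List Int) : ∀ (acc : List Int), acc ≠ [] →
    xs.foldl (fun pref c => pref ++ [pref.getLastD 0 + c]) acc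
      = acc.dropLast ++ pvPsums (acc.getLastD 0) xs := by
  induction xs with
  | nil =>
      intro acc h
      simpa [pvPsums] using (pv_dropLast_getLastD acc h).symm
  | cons c r ih =>
      intro acc h
      have h' : acc ++ [acc.getLastD 0 + c] ≠ [] := by simp
      calc (c :: r).foldl (fun pref c => pref ++ [pref.getLastD 0 + c]) acc
          = r.foldl (fun pref c => pref ++ [pref.getLastD 0 + c])
              (acc ++ [acc.getLastD 0 + c]) := rfl
        _ = (acc ++ [acc.getLastD 0 + c]).dropLast
              ++ pvPsums ((acc ++ [acc.getLastD 0 + c]).getLastD 0) r := ih _ h'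
        _ = acc ++ pvPsums (acc.getLastD 0 + c) r := by simp
        _ = acc.dropLast ++ pvPsums (acc.getLastD 0) (c :: r) := by
              rw [pvPsums]
              rw [show acc.dropLast ++ (acc.getLastD 0 :: pvPsums (acc.getLastD 0 + c) r)
                    = (acc.dropLast ++ [acc.getLastD 0]) ++ pvPsums (acc.getLastD 0 + c) r by simp]
              rw [pv_dropLast_getLastD acc h]

theorem pvBuildPrefix_eq (xs : List Int) : pvBuildPrefix xs = pvPsums 0 xs := by
  simpa [pvBuildPrefix] using pvBuildPrefix_aux xs [0] (by simp)

theorem pvPsums_last (xs : List Int) : ∀ b : Int, (pvPsums b xs).getLastD 0 = b + xs.sum := by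
  induction xs with
  | nil => intro b; simp [pvPsums]
  | cons c r ih =>
      intro b
      have hne : pvPsums (b + c) r ≠ [] := by cases r <;> simp [pvPsums]
      cases hpp : pvPsums (b + c) r with
      | nil => exact absurd hpp hne
      | cons h t =>
          have hih := ih (b + c)
          rw [hpp] at hih
          rw [pvPsums, hpp, List.getLastD_eq_getLast?, List.getLast?_cons_cons,
            ← List.getLastD_eq_getLast?, List.sum_cons]
          omega

theorem pv_key (xs : List Int) : ∀ (b : Int) (pref : List Int),
    pref.getLastD 0 = b + xs.sum →
    pvLoopA xs (b + 1) = pvLoopB (xs.zip (pvPsums b xs)) pref := by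
  induction xs with
  | nil =>
      intro b pref hp
      rw [List.getLastD_eq_getLast?] at hp
      simp at hp
      simp [pvPsums, pvLoopA, pvLoopB, hp]
  | cons c r ih =>
      intro b pref hp
      simp only [pvPsums, List.zip_cons_cons, pvLoopA, pvLoopB]
      by_cases hc : c ≤ b + 1
      · rw [if_pos hc, if_neg (by omega)]
        have : b + 1 + c = (b + c) + 1 := by ring
        rw [this]
        apply ih
        rw [List.sum_cons] at hp
        omega
      · rw [if_neg hc, if_pos (by omega)]

theorem getMaximumConsecutive_point (coins : List Int) :
    getMaximumConsecutive coins = getMaximumConsecutive_alt coins := by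
  have halt : getMaximumConsecutive_alt coins =
      pvLoopB ((PySem.List.sorted coins (fun x => x) false).zip
        (pvPsums 0 (PySem.List.sorted coins (fun x => x) false)))
        (pvPsums 0 (PySem.List.sorted coins (fun x => x) false)) := by
    simp [getMaximumConsecutive_alt, pvBuildPrefix_eq]
  rw [getMaximumConsecutive, halt]
  simpa using pv_key (PySem.List.sorted coins (fun x => x) false) 0 _ (pvPsums_last _ 0)

-- ===== VERDICT (by name: the statement is the Claim_ definition above) =====
theorem getMaximumConsecutive_spec : Claim_equal_getMaximumConsecutive := by
  intro coins _
  exact getMaximumConsecutive_point coins
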